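-- pv_equiv track=rewrite | github.com/yunojang/jungle-bj | solved/8958_ox.py | get_score
-- ===== SOURCE A (Python) =====
-- def get_score(results):
--     score = 0
--     scores = [0] * len(results)
--     for i in range(len(results)):
--         if results[i] == "O":
--             scores[i] = (scores[i - 1] if i > 0 else 0) + 1
--     for v in scores:
--         score += v
--     return score
-- ===== SOURCE B (Python) =====
-- def get_score(results):
--     total = 0
--     n = len(results)
--     i = 0
--     while i < n:
--         if results[i] == "O":
--             j = i
--             while j < n and results[j] == "O":
--                 j += 1
--             k = j - i
--             total += k * (k + 1) // 2
--             i = j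
--         else:
--             i += 1
--     return total
-- ===== Notes on version B (the rewrite author's own statement) =====
-- stated objective: alternative
-- what changed: Instead of filling a per-index streak array and summing it in a second pass, B makes a single index scan that finds each maximal run of "O" and adds the closed-form triangular number k*(k+1)//2 per run.
import Mathlib
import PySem

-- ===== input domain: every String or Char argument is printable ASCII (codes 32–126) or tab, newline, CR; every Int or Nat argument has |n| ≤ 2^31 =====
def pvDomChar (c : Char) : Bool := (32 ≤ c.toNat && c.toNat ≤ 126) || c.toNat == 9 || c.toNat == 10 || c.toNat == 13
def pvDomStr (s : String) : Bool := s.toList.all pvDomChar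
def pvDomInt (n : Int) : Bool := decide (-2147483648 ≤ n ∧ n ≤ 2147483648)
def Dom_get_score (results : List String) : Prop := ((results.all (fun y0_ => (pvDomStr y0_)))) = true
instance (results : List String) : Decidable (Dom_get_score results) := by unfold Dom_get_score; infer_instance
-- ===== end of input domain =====

-- B replaces A's per-index streak array + second summing pass with a single scan over
-- maximal runs of "O", adding the closed-form triangular number k*(k+1)//2 per run.


-- ===== PORT A =====
def get_score (results : List String) : Int :=
  let scores : List Int := List.replicate results.length 0
  let scores :=
    (PySem.List.pyRange 0 (results.length : Int) 1).foldl
      (fun sc i =>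
        if PySem.List.pyGetD results i "" = "O" then
          PySem.List.pySetD sc i
            ((if i > 0 then PySem.List.pyGetD sc (i - 1) 0 else 0) + 1)
        else sc)
      scores
  scores.foldl (fun score v => score + v) 0

-- ===== PORT B =====
-- inner `while j < n and results[j] == "O"` loop of Source B (fuel only makes it total:
-- j grows by 1 per step, so fuel results.length - j is never exhausted early)
def scanRun (results : List String) : Nat → Nat → Nat
  | 0, j => j
  | fuel + 1, j =>
    if j < results.length ∧ results.getD j "" = "O" then scanRun results fuel (j + 1) else j

-- outer `while i < n` loop of Source B, accumulating total (fuel likewise only for totality)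
def scoreLoop (results : List String) : Nat → Nat → Int → Int
  | 0, _, total => total
  | fuel + 1, i, total =>
    if i < results.length then
      if results.getD i "" = "O" then
        let j := scanRun results (results.length - i) i
        let k := j - i
        scoreLoop results fuel j (total + PySem.Int.floordiv ((k : Int) * ((k : Int) + 1)) 2)
      else scoreLoop results fuel (i + 1) total
    else total

def get_score_alt (results : List String) : Int := scoreLoop results results.length 0 0

-- ===== PRECONDITION & SPEC =====
def Spec_get_score (results : List String) (out : Int) : Prop := out = get_score_alt results
instance (results : List String) (out : Int) : Decidable (Spec_get_score results out) := by unfold Spec_get_score; infer_instance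

-- ===== CLAIM (what is proved, stated in full; the proofs are below) =====
def Claim_equal_get_score : Prop := ∀ (results : List String), Dom_get_score results → Spec_get_score results (get_score results)

-- ===== LEMMAS AND PROOFS =====

-- the streak array A builds, as a scan with carry c
def streak : List String → Int → List Int
  | [], _ => []
  | s :: rest, c => if s = "O" then (c + 1) :: streak rest (c + 1) else 0 :: streak rest 0

-- leading run of "O": (count, remainder) — proof-side bridge between the two loop shapes
def runO : List String → Nat × List String
  | [] => (0, [])
  | s :: rest =>
    if s = "O" then
      let p := runO rest
      (p.1 + 1, p.2)
    else (0, s :: rest)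

theorem length_streak (l : List String) (c : Int) : (streak l c).length = l.length := by
  induction l generalizing c with
  | nil => rfl
  | cons s rest ih => by_cases h : s = "O" <;> simp [streak, h, ih]

theorem streak_getD (l : List String) (c : Int) (m : Nat) (hm : m < l.length) :
    (streak l c).getD m 0 =
      if l.getD m "" = "O" then
        (if m = 0 then c else (streak l c).getD (m - 1) 0) + 1
      else 0 := by
  induction l generalizing c m with
  | nil => simp at hm
  | cons s rest ih =>
    by_cases hs : s = "O"
    · cases m with
      | zero => simp [streak, hs]
      | succ k =>
        have hk : k < rest.length := by simpa using hm
        have hin : ((c + 1) :: streak rest (c + 1)).getD k 0 =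
            if k = 0 then (c + 1) else (streak rest (c + 1)).getD (k - 1) 0 := by
          cases k <;> simp
        simp only [streak, if_pos hs, List.getD_cons_succ, Nat.add_sub_cancel,
          Nat.succ_ne_zero, if_false]
        rw [ih (c + 1) k hk, hin]
    · cases m with
      | zero => simp [streak, hs]
      | succ k =>
        have hk : k < rest.length := by simpa using hm
        have hin : ((0 : Int) :: streak rest 0).getD k 0 =
            if k = 0 then (0 : Int) else (streak rest 0).getD (k - 1) 0 := by
          cases k <;> simp
        simp only [streak, if_neg hs, List.getD_cons_succ, Nat.add_sub_cancel,
          Nat.succ_ne_zero, if_false]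
        rw [ih 0 k hk, hin]

theorem A_fold_eq_streak (results : List String) (m : Nat) (hm : m ≤ results.length) :
    (PySem.List.pyRange 0 (m : Int) 1).foldl
      (fun sc i =>
        if PySem.List.pyGetD results i "" = "O" then
          PySem.List.pySetD sc i
            ((if i > 0 then PySem.List.pyGetD sc (i - 1) 0 else 0) + 1)
        else sc)
      (List.replicate results.length 0)
    = (streak results 0).take m ++ List.replicate (results.length - m) 0 := by
  induction m with
  | zero =>
    rw [Nat.cast_zero, PySem.List.pyRange_one_eq_nil (le_refl 0)]
    simp
  | succ m ih =>
    have hmn : m < results.length := hm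
    have h1 : ((m + 1 : Nat) : Int) = (m : Int) + 1 := by push_cast; ring
    rw [h1, PySem.List.pyRange_one_succ_right (by positivity), List.foldl_append,
      ih (Nat.le_of_succ_le hm)]
    simp only [List.foldl_cons, List.foldl_nil]
    set sa := streak results 0 with hsa
    have hsalen : sa.length = results.length := length_streak _ _
    have htklen : (sa.take m).length = m := by
      rw [List.length_take]; omega
    have hcond : PySem.List.pyGetD results (m : Int) "" = results.getD m "" :=
      PySem.List.pyGetD_natCast _ _ _
    -- the value the guarded assignment would write is exactly sa.getD m 0
    have hval : (if (m : Int) > 0 then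
          PySem.List.pyGetD (sa.take m ++ List.replicate (results.length - m) 0) ((m : Int) - 1) 0
        else 0) = if m = 0 then (0 : Int) else sa.getD (m - 1) 0 := by
      cases m with
      | zero => simp
      | succ k =>
        have hpos : ((k + 1 : Nat) : Int) > 0 := by positivity
        have hc : ((k + 1 : Nat) : Int) - 1 = (k : Nat) := by push_cast; ring
        rw [if_pos hpos, hc, PySem.List.pyGetD_natCast,
          List.getD_append _ _ _ _ (by omega)]
        simp [List.getD]
    have hsam : sa.getD m 0 = sa[m]'(by omega) := List.getD_eq_getElem _ _ (by omega)
    have htake : sa.take (m + 1) = sa.take m ++ [sa.getD m 0] := by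
      rw [List.take_add_one, List.getElem?_eq_getElem (by omega : m < sa.length), hsam]
      simp
    by_cases ho : results.getD m "" = "O"
    · -- assignment happens: streak value at m is carry+1
      have hstreak : sa.getD m 0 = (if m = 0 then (0 : Int) else sa.getD (m - 1) 0) + 1 := by
        rw [hsa, streak_getD results 0 m hmn, if_pos ho]
      simp only [hcond, if_pos ho, hval, PySem.List.pySetD_natCast, ← hstreak]
      rw [List.set_append, htklen, if_neg (lt_irrefl m), Nat.sub_self,
        show results.length - m = (results.length - (m + 1)) + 1 by omega,
        List.replicate_succ, List.set_cons_zero, htake]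
      simp
    · -- no assignment: streak value at m is 0
      have hstreak : sa.getD m 0 = 0 := by
        rw [hsa, streak_getD results 0 m hmn, if_neg ho]
      simp only [hcond, if_neg ho]
      rw [htake, hstreak,
        show results.length - m = (results.length - (m + 1)) + 1 by omega,
        List.replicate_succ]
      simp

theorem get_score_eq_sum_streak (results : List String) :
    get_score results = (streak results 0).sum := by
  simp only [get_score]
  rw [A_fold_eq_streak results results.length (le_refl _),
    List.take_of_length_le (by rw [length_streak]), Nat.sub_self]
  rw [List.replicate_zero, List.append_nil,
    PySem.List.foldl_add _ (fun v => v) 0]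
  simp

theorem sum_streak_run (l : List String) (c : Int) :
    (streak l c).sum =
      ((runO l).1 : Int) * c + (((runO l).1 * ((runO l).1 + 1) / 2 : Nat) : Int)
        + (streak (runO l).2 0).sum := by
  induction l generalizing c with
  | nil => simp [streak, runO]
  | cons s rest ih =>
    by_cases hs : s = "O"
    · simp only [streak, runO, if_pos hs, List.sum_cons]
      rw [ih (c + 1)]
      set k := (runO rest).1 with hk
      have htri : (k + 1) * ((k + 1) + 1) / 2 = k * (k + 1) / 2 + (k + 1) := by
        rw [show (k + 1) * ((k + 1) + 1) = k * (k + 1) + (k + 1) * 2 by ring,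
          Nat.add_mul_div_right _ _ (by omega)]
      push_cast [htri]
      ring
    · simp only [streak, runO, if_neg hs, List.sum_cons]
      simp

theorem le_scanRun (results : List String) (fuel : Nat) :
    ∀ j : Nat, j ≤ scanRun results fuel j := by
  induction fuel with
  | zero => intro j; simp [scanRun]
  | succ fuel ih =>
    intro j
    simp only [scanRun]
    split
    · exact le_trans (Nat.le_succ j) (ih (j + 1))
    · exact le_refl j

theorem scanRun_runO_drop (results : List String) (fuel : Nat) :
    ∀ j : Nat, results.length - j ≤ fuel →
      runO (results.drop j)
        = (scanRun results fuel j - j, results.drop (scanRun results fuel j)) := by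
  induction fuel with
  | zero =>
    intro j h
    have hj : results.length ≤ j := by omega
    simp [runO, scanRun, List.drop_eq_nil_of_le hj]
  | succ fuel ih =>
    intro j h
    by_cases hj : j < results.length
    · have hd : results.drop j = results[j] :: results.drop (j + 1) :=
        List.drop_eq_getElem_cons hj
      have hgd : results.getD j "" = results[j] := List.getD_eq_getElem _ _ hj
      by_cases ho : results.getD j "" = "O"
      · have hsr : scanRun results (fuel + 1) j = scanRun results fuel (j + 1) := by
          simp only [scanRun]; rw [if_pos ⟨hj, ho⟩]
        have hle : j + 1 ≤ scanRun results fuel (j + 1) := le_scanRun results fuel (j + 1)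
        rw [hd, runO, if_pos (by rw [← hgd]; exact ho), ih (j + 1) (by omega), hsr]
        have hk : scanRun results fuel (j + 1) - (j + 1) + 1
            = scanRun results fuel (j + 1) - j := by omega
        simp [hk]
      · have hsr : scanRun results (fuel + 1) j = j := by
          simp only [scanRun]; rw [if_neg (by intro hc; exact ho hc.2)]
        rw [hsr, Nat.sub_self, hd, runO, if_neg (by rw [← hgd]; exact ho), ← hd]
    · have hsr : scanRun results (fuel + 1) j = j := by
        simp only [scanRun]; rw [if_neg (by intro hc; exact hj hc.1)]
      rw [hsr, Nat.sub_self, List.drop_eq_nil_of_le (by omega), runO]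

theorem scoreLoop_eq (results : List String) (fuel : Nat) :
    ∀ (i : Nat) (total : Int), results.length - i ≤ fuel →
      scoreLoop results fuel i total = total + (streak (results.drop i) 0).sum := by
  induction fuel with
  | zero =>
    intro i total h
    rw [List.drop_eq_nil_of_le (by omega)]
    simp [scoreLoop, streak]
  | succ fuel ih =>
    intro i total h
    by_cases hi : i < results.length
    · have hd : results.drop i = results[i] :: results.drop (i + 1) :=
        List.drop_eq_getElem_cons hi
      have hgd : results.getD i "" = results[i] := List.getD_eq_getElem _ _ hi
      by_cases ho : results.getD i "" = "O"
      · simp only [scoreLoop, if_pos hi, if_pos ho]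
        have hfe : results.length - i = (results.length - (i + 1)) + 1 := by omega
        have hj1 : i + 1 ≤ scanRun results (results.length - i) i := by
          rw [hfe]
          simp only [scanRun]
          rw [if_pos ⟨hi, ho⟩]
          exact le_scanRun results _ (i + 1)
        have hrun := scanRun_runO_drop results (results.length - i) i (le_refl _)
        rw [ih (scanRun results (results.length - i) i) _ (by omega)]
        have hsum := sum_streak_run (results.drop i) 0
        rw [hrun] at hsum
        set k := scanRun results (results.length - i) i - i with hk
        have hcast : ((k : Int) * ((k : Int) + 1)) = ((k * (k + 1) : Nat) : Int) := by
          push_cast; ring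
        rw [hsum, hcast, show (2 : Int) = ((2 : Nat) : Int) from rfl,
          PySem.Int.floordiv_natCast]
        ring
      · simp only [scoreLoop, if_pos hi, if_neg ho]
        rw [ih (i + 1) total (by omega), hd, streak, if_neg (by rw [← hgd]; exact ho)]
        simp
    · rw [List.drop_eq_nil_of_le (by omega)]
      simp only [scoreLoop, if_neg hi]
      simp [streak]

-- ===== VERDICT (by name: the statement is the Claim_ definition above) =====
theorem get_score_spec : Claim_equal_get_score := by
  intro results _
  unfold Spec_get_score
  rw [get_score_eq_sum_streak]
  unfold get_score_alt
  rw [scoreLoop_eq results results.length 0 0 (by omega)]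
  simp
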